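-- pv_equiv track=rewrite | github.com/rlhinrichs/world-series | P22-HW6-rlhinrichs.py | year_lookup
-- ===== SOURCE A (Python) =====
-- def year_lookup(names):
--     year = []            # list to store years of games played
--     series_games = {}    # dictionary to store year: team
--
--     # Create the list of years of world series games
--     for line, item in enumerate(names):
--         if line == 0:
--             year.append(1903 + line)           # beginning with year 1903
--         elif line == 1 or line == 90:
--             year.append(year[line - 1] + 2)    # skip years 1904, 1994
--         else:
--             year.append(year[line - 1] + 1)
--
--     # Create dictionary of game year : winning team
--     for team in range(len(names)):
--         series_games[year[team]] = names[team]
--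
--     return series_games
-- ===== SOURCE B (Python) =====
-- def year_lookup(names):
--     # closed-form year for index i: 1903 + i, skipping 1904 (i>=1) and 1994 (i>=90)
--     return {1903 + i + (i >= 1) + (i >= 90): name for i, name in enumerate(names)}
-- ===== Notes on version B (the rewrite author's own statement) =====
-- stated objective: simpler
-- what changed: Replaces the recurrence-built intermediate year list plus a second indexing loop with a single dict comprehension whose key is a closed-form function of the index (1903 + i + (i>=1) + (i>=90)).
import Mathlib
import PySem

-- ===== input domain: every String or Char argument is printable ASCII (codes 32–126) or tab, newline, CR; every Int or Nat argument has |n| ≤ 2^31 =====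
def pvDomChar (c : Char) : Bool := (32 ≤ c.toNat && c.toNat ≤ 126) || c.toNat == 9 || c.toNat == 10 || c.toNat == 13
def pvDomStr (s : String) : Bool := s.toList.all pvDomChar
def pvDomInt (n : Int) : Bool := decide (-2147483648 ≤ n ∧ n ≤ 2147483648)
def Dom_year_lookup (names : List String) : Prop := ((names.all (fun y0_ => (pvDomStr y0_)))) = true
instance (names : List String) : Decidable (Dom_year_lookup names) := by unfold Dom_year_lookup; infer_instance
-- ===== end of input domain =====

-- B replaces A's recurrence-built year list plus second indexing loop by one pass
-- with a closed-form key per index (objective: simpler; same O(n) cost).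

-- ===== PORT A =====
-- year[line-1] / year[team] / names[team]: the indices are always in range here
-- (Python would raise IndexError otherwise; it never does), so pyGetD is exact.
def year_lookup (names : List String) : List (Int × String) :=
  let year : List Int :=
    (PySem.List.enumerate names).foldl (fun yr p =>
      if p.1 = 0 then yr ++ [1903 + p.1]
      else if p.1 = 1 ∨ p.1 = 90 then yr ++ [PySem.List.pyGetD yr (p.1 - 1) 0 + 2]
      else yr ++ [PySem.List.pyGetD yr (p.1 - 1) 0 + 1]) []
  let series_games : PySem.Dict Int String :=
    (PySem.List.pyRange 0 (PySem.List.len names) 1).foldl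
      (fun d team => d.insert (PySem.List.pyGetD year team 0) (PySem.List.pyGetD names team "")) PySem.Dict.empty
  series_games.items

-- ===== PORT B =====
def year_lookup_alt (names : List String) : List (Int × String) :=
  ((PySem.List.enumerate names).foldl (fun d p =>
      d.insert (1903 + p.1 + (if 1 ≤ p.1 then 1 else 0) + (if 90 ≤ p.1 then 1 else 0)) p.2)
    PySem.Dict.empty).items

-- ===== PRECONDITION & SPEC =====
def Spec_year_lookup (names : List String) (out : List (Int × String)) : Prop := out = year_lookup_alt names
instance (names : List String) (out : List (Int × String)) : Decidable (Spec_year_lookup names out) := by unfold Spec_year_lookup; infer_instance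

-- ===== CLAIM (what is proved, stated in full; the proofs are below) =====
def Claim_equal_year_lookup : Prop := ∀ (names : List String), Dom_year_lookup names → Spec_year_lookup names (year_lookup names)

-- ===== LEMMAS AND PROOFS =====

-- the closed-form year B assigns to index i
def pvYearF (i : Int) : Int := 1903 + i + (if 1 ≤ i then 1 else 0) + (if 90 ≤ i then 1 else 0)

-- reading the last element of the closed-form year list
lemma pvGetLast (n : Nat) (hn : 1 ≤ n) :
    PySem.List.pyGetD ((PySem.List.pyRange 0 (n:Int) 1).map pvYearF) ((n:Int) - 1) 0
      = pvYearF ((n:Int) - 1) := by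
  have h1 : ((n:Int)) = ((n-1 : Nat):Int) + 1 := by omega
  rw [h1, PySem.List.pyRange_one_succ_right (by positivity)]
  have h2 : ((n-1 : Nat):Int) + 1 - 1 = ((n-1:Nat):Int) := by ring
  rw [List.map_append, h2, PySem.List.pyGetD_natCast]
  have hl : ((PySem.List.pyRange 0 ((n-1:Nat):Int) 1).map pvYearF).length = n - 1 := by
    simp [PySem.List.pyRange_zero_natCast]
  simp [List.getD, hl]

-- the recurrence step of A equals the difference of the closed form
lemma pvStep (n : Nat) (hn : 1 ≤ n) :
    pvYearF ((n:Int) - 1) + (if (n:Int) = 1 ∨ (n:Int) = 90 then 2 else 1) = pvYearF (n:Int) := by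
  unfold pvYearF; split_ifs <;> omega

-- A's first loop builds exactly the closed-form list of years
lemma pvYearList_eq (names : List String) :
    (PySem.List.enumerate names).foldl (fun yr p =>
      if p.1 = 0 then yr ++ [1903 + p.1]
      else if p.1 = 1 ∨ p.1 = 90 then yr ++ [PySem.List.pyGetD yr (p.1 - 1) 0 + 2]
      else yr ++ [PySem.List.pyGetD yr (p.1 - 1) 0 + 1]) []
    = (PySem.List.pyRange 0 (PySem.List.len names) 1).map pvYearF := by
  induction names using List.reverseRecOn with
  | nil => rfl
  | append_singleton xs x ih =>
    rw [PySem.List.enumerate_append, List.foldl_append, ih]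
    simp only [PySem.List.enumerate_cons, PySem.List.enumerate_nil, List.foldl_cons, List.foldl_nil,
      zero_add, PySem.List.len, List.length_append, List.length_cons, List.length_nil]
    by_cases h0 : xs.length = 0
    · obtain rfl : xs = [] := List.eq_nil_of_length_eq_zero h0
      simp
      decide
    · have hn : 1 ≤ xs.length := by omega
      have hne : ¬ ((xs.length : Int) = 0) := by exact_mod_cast h0
      rw [if_neg hne]
      have hr : ((xs.length + 1 : Nat) : Int) = (xs.length : Int) + 1 := by push_cast; ring
      rw [hr, PySem.List.pyRange_one_succ_right (by positivity), List.map_append]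
      rw [pvGetLast xs.length hn]
      split_ifs with hc
      · rw [show pvYearF ((xs.length:Int) - 1) + 2
              = pvYearF ((xs.length:Int) - 1) + (if (xs.length:Int) = 1 ∨ (xs.length:Int) = 90 then 2 else 1)
            from by rw [if_pos hc], pvStep xs.length hn]
        simp
      · rw [show pvYearF ((xs.length:Int) - 1) + 1
              = pvYearF ((xs.length:Int) - 1) + (if (xs.length:Int) = 1 ∨ (xs.length:Int) = 90 then 2 else 1)
            from by rw [if_neg hc], pvStep xs.length hn]
        simp

-- ===== VERDICT (by name: the statement is the Claim_ definition above) =====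
theorem year_lookup_spec : Claim_equal_year_lookup := by
  intro names _
  simp only [Spec_year_lookup, year_lookup, year_lookup_alt]
  rw [pvYearList_eq]
  congr 1
  rw [PySem.List.enumerate_eq_map_pyRange names "", List.foldl_map]
  apply PySem.List.foldl_congr_mem
  intro acc j hj
  dsimp only
  have hjr : 0 ≤ j ∧ j < PySem.List.len names := PySem.List.mem_pyRange_one.mp hj
  have hlen : PySem.List.len names = (names.length : Int) := rfl
  have hk : j = (j.toNat : Int) := by omega
  rw [hk, hlen, PySem.List.pyGetD_map_pyRange pvYearF names.length j.toNat 0 (by omega)]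
  rfl
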